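-- pv_equiv track=rewrite | github.com/kiw331/ROKEY_team6_study | SojeongLim/week2/수묶기1744.py | max_sum_with_pairs
-- ===== SOURCE A (Python) =====
-- def max_sum_with_pairs(n, numbers):
--     positives = []  # 양수 저장
--     negatives = []  # 음수 저장
--     ones = 0        # 1의 개수 저장
--     total_sum = 0   # 결과 합 저장
--
--     # Step 1: 수열을 양수, 음수, 1로 분류
--     for num in numbers:
--         if num > 1:
--             positives.append(num)
--         elif num == 1:
--             ones += 1
--         else:  # num <= 0
--             negatives.append(num)
--
--     # Step 2: 양수는 내림차순 정렬, 음수는 오름차순 정렬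
--     positives.sort(reverse=True)
--     negatives.sort()
--
--     # Step 3: 양수를 묶어서 합산
--     for i in range(0, len(positives) - 1, 2):
--         total_sum += positives[i] * positives[i + 1]
--     # 남은 하나가 있다면 더함
--     if len(positives) % 2 == 1:
--         total_sum += positives[-1]
--
--     # Step 4: 음수를 묶어서 합산
--     for i in range(0, len(negatives) - 1, 2):
--         total_sum += negatives[i] * negatives[i + 1]
--     # 남은 하나가 있다면 더하지 않고 버림 (0이 있는 경우와 묶이기 때문)
--     if len(negatives) % 2 == 1:
--         total_sum += negatives[-1]
--
--     # Step 5: 1의 개수를 모두 더함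
--     total_sum += ones
--
--     return total_sum
-- ===== SOURCE B (Python) =====
-- def max_sum_with_pairs(n, numbers):
--     # One ascending sort of a copy, then two converging pointer scans:
--     # pair non-positives two at a time from the small end (odd leftover added alone),
--     # then pair values from the big end, adding solitary 1s directly.
--     s = sorted(numbers)
--     total = 0
--     i = 0
--     while i + 1 < len(s) and s[i + 1] <= 0:
--         total += s[i] * s[i + 1]
--         i += 2
--     if i < len(s) and s[i] <= 0:
--         total += s[i]
--         i += 1
--     j = len(s) - 1
--     while j >= i:
--         if s[j] == 1:
--             total += 1
--             j -= 1
--         elif j - 1 >= i and s[j - 1] > 1: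
--             total += s[j] * s[j - 1]
--             j -= 2
--         else:
--             total += s[j]
--             j -= 1
--     return total
-- ===== Notes on version B (the rewrite author's own statement) =====
-- stated objective: alternative
-- what changed: Replaces A's three-bucket classification with two separately sorted buckets and two indexed pairing loops by a single ascending sort of a copy followed by two converging recursive scans: non-positives are paired two at a time from the small end, large values from the big end, with solitary 1s and the odd leftover added alone.
import Mathlib
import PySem

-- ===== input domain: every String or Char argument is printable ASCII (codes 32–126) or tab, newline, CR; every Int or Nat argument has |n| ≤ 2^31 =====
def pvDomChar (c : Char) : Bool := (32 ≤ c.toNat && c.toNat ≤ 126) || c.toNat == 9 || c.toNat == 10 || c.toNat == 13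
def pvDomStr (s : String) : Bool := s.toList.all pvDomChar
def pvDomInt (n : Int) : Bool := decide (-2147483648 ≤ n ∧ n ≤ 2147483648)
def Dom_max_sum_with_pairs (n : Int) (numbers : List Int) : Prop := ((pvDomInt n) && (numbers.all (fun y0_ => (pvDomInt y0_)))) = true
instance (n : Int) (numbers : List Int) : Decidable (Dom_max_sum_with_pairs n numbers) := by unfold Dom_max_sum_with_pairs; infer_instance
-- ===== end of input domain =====

-- B replaces A's three buckets and two sorts by ONE ascending sort of a copy plus two
-- converging recursive scans (non-positives from the small end, positives from the big end);
-- A sorts local copies only, so no caller-visible mutation is at stake. Objective: alternative.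

-- ===== PORT A =====
def max_sum_with_pairs (n : Int) (numbers : List Int) : Int :=
  -- Step 1: classify into positives (>1), negatives (<=0), ones
  let st := numbers.foldl (fun (st : List Int × List Int × Int) num =>
      if 1 < num then (st.1 ++ [num], st.2.1, st.2.2)
      else if num = 1 then (st.1, st.2.1, st.2.2 + 1)
      else (st.1, st.2.1 ++ [num], st.2.2)) (([] : List Int), ([] : List Int), (0 : Int))
  -- Step 2: positives descending, negatives ascending
  let positives := PySem.List.sorted st.1 (fun x => x) true
  let negatives := PySem.List.sorted st.2.1 (fun x => x) false
  -- Step 3: pair the positives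
  let t1 := (PySem.List.pyRange 0 ((positives.length : Int) - 1) 2).foldl
      (fun acc i => acc + PySem.List.pyGetD positives i 0 * PySem.List.pyGetD positives (i + 1) 0) 0
  let t2 := if positives.length % 2 = 1 then t1 + PySem.List.pyGetD positives (-1) 0 else t1
  -- Step 4: pair the negatives
  let t3 := (PySem.List.pyRange 0 ((negatives.length : Int) - 1) 2).foldl
      (fun acc i => acc + PySem.List.pyGetD negatives i 0 * PySem.List.pyGetD negatives (i + 1) 0) t2
  let t4 := if negatives.length % 2 = 1 then t3 + PySem.List.pyGetD negatives (-1) 0 else t3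
  -- Step 5: add the ones
  t4 + st.2.2

-- ===== PORT B =====
-- B's second while loop (pointer j walking down): structural recursion over the
-- not-yet-consumed values in descending order; pair from the big end, 1s added alone
def pvHigh : List Int → Int
  | [] => 0
  | [a] => if a = 1 then 1 + pvHigh [] else a + pvHigh ([] : List Int)
  | a :: b :: t =>
      if a = 1 then 1 + pvHigh (b :: t)
      else if 1 < b then a * b + pvHigh t
      else a + pvHigh (b :: t)

-- B's first while loop (pointer i walking up by 2 over the sorted copy): structural
-- recursion consuming the non-positives two at a time from the front; the remainder,
-- scanned downward from j in Python, is handed to pvHigh reversed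
def pvLow : List Int → Int
  | [] => pvHigh (List.reverse ([] : List Int))
  | [x] => if x ≤ 0 then x + pvLow [] else pvHigh (List.reverse [x])
  | x :: y :: rest =>
      if y ≤ 0 then x * y + pvLow rest
      else if x ≤ 0 then x + pvLow (y :: rest)
      else pvHigh (List.reverse (x :: y :: rest))

def max_sum_with_pairs_alt (n : Int) (numbers : List Int) : Int :=
  pvLow (PySem.List.sorted numbers (fun x => x) false)

-- ===== PRECONDITION & SPEC =====
def Spec_max_sum_with_pairs (n : Int) (numbers : List Int) (out : Int) : Prop := out = max_sum_with_pairs_alt n numbers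
instance (n : Int) (numbers : List Int) (out : Int) : Decidable (Spec_max_sum_with_pairs n numbers out) := by unfold Spec_max_sum_with_pairs; infer_instance

-- ===== CLAIM (what is proved, stated in full; the proofs are below) =====
def Claim_equal_max_sum_with_pairs : Prop := ∀ (n : Int) (numbers : List Int), Dom_max_sum_with_pairs n numbers → Spec_max_sum_with_pairs n numbers (max_sum_with_pairs n numbers)

-- ===== LEMMAS AND PROOFS =====

-- adjacent-pair sum with the odd leftover added
def pairRec : List Int → Int
  | [] => 0
  | [x] => x
  | x :: y :: r => x * y + pairRec r

-- adjacent-pair sum, leftover dropped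
def pairRecEven : List Int → Int
  | [] => 0
  | [_] => 0
  | x :: y :: r => x * y + pairRecEven r

-- A's partition loop builds the two filters and the count of ones
lemma part_fold (xs : List Int) (p ng : List Int) (o : Int) :
    xs.foldl (fun (st : List Int × List Int × Int) num =>
      if 1 < num then (st.1 ++ [num], st.2.1, st.2.2)
      else if num = 1 then (st.1, st.2.1, st.2.2 + 1)
      else (st.1, st.2.1 ++ [num], st.2.2)) (p, ng, o)
    = (p ++ xs.filter (fun x => decide (1 < x)),
       ng ++ xs.filter (fun x => decide (x ≤ 0)),
       o + (xs.count 1 : Int)) := by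
  induction xs generalizing p ng o with
  | nil => simp
  | cons x t ih =>
    by_cases h1 : 1 < x
    · simp [List.foldl_cons, h1, ih, List.filter_cons, show ¬ x ≤ 0 by omega,
        List.count_cons, show x ≠ 1 by omega]
    · by_cases h2 : x = 1
      · subst h2
        simp only [List.foldl_cons, if_neg (by omega : ¬ (1:Int) < 1), if_pos rfl, ih,
          List.filter_cons, List.count_cons]
        simp
        omega
      · simp only [List.foldl_cons, if_neg h1, if_neg h2, ih, List.filter_cons,
          List.count_cons]
        simp [show x ≤ 0 by omega, show ¬ 1 < x by omega, h2]

-- the indexed step-2 loop in Nat form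
lemma rsum_nat (l : List Int) :
    ((List.range (l.length / 2)).map (fun k => l.getD (2 * k) 0 * l.getD (2 * k + 1) 0)).sum
      = pairRecEven l := by
  induction l using pairRecEven.induct with
  | case1 => simp [pairRecEven]
  | case2 _ => simp [pairRecEven]
  | case3 x y r ih =>
    have hlen : (x :: y :: r).length / 2 = r.length / 2 + 1 := by simp; omega
    rw [hlen, List.range_succ_eq_map, List.map_cons, List.sum_cons]
    have h2 : List.map ((fun k => (x :: y :: r).getD (2 * k) 0 * (x :: y :: r).getD (2 * k + 1) 0) ∘ Nat.succ)
        (List.range (r.length / 2))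
        = List.map (fun k => r.getD (2 * k) 0 * r.getD (2 * k + 1) 0) (List.range (r.length / 2)) := by
      apply List.map_congr_left
      intro k _
      simp only [Function.comp_apply, Nat.succ_eq_add_one]
      rw [show 2 * (k + 1) = (2 * k) + 1 + 1 by ring,
        List.getD_cons_succ, List.getD_cons_succ, List.getD_cons_succ, List.getD_cons_succ]
    rw [List.map_map, h2, ih]
    simp [pairRecEven]

-- A's step-2 range loop computes pairRecEven
lemma rangeSum (l : List Int) (c : Int) :
    (PySem.List.pyRange 0 ((l.length : Int) - 1) 2).foldl
      (fun acc i => acc + PySem.List.pyGetD l i 0 * PySem.List.pyGetD l (i + 1) 0) c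
    = c + pairRecEven l := by
  rw [PySem.List.pyRange_of_pos 0 ((l.length : Int) - 1) (by norm_num), PySem.List.foldl_add]
  have hn : (if (0:Int) < (l.length : Int) - 1
      then ((((l.length : Int) - 1) - 0 + 2 - 1) / 2).toNat else 0) = l.length / 2 := by
    split_ifs with h
    · omega
    · omega
  rw [hn, List.map_map, ← rsum_nat l]
  refine congrArg _ (congrArg List.sum (List.map_congr_left ?_))
  intro k _
  simp only [Function.comp_apply]
  rw [show ((0:Int) + 2 * (k : Int)) = ((2 * k : Nat) : Int) by push_cast; ring]
  rw [show (((2 * k : Nat) : Int) + 1) = ((2 * k + 1 : Nat) : Int) by push_cast; ring]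
  rw [PySem.List.pyGetD_natCast, PySem.List.pyGetD_natCast]

-- adding the odd leftover turns pairRecEven into pairRec
lemma pairRec_split (l : List Int) :
    pairRecEven l + (if l.length % 2 = 1 then PySem.List.pyGetD l (-1) 0 else 0) = pairRec l := by
  induction l using pairRec.induct with
  | case1 => simp [pairRec, pairRecEven]
  | case2 x =>
    simp [pysem, pairRec, pairRecEven]
  | case3 x y r ih =>
    rcases eq_or_ne r [] with rfl | hr
    · simp [pairRec, pairRecEven]
    · have hlast : PySem.List.pyGetD (x :: y :: r) (-1) 0 = PySem.List.pyGetD r (-1) 0 := by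
        simp [pysem, hr]
        rw [show (y :: r)[r.length] = (y :: r).getLast (by simp) from by
            rw [List.getLast_eq_getElem]; simp only [List.length_cons, Nat.add_sub_cancel]; rfl,
          List.getLast_cons hr]
      have hmod : (x :: y :: r).length % 2 = r.length % 2 := by simp; omega
      simp only [pairRec, pairRecEven, hmod, hlast]
      rw [← ih]
      ring

lemma high_ones (k : Nat) : pvHigh (List.replicate k 1) = k := by
  induction k with
  | zero => simp [pvHigh]
  | succ m ih =>
    cases m with
    | zero => simp [pvHigh]
    | succ m' =>
      simp only [List.replicate_succ, pvHigh] at ih ⊢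
      simp at ih ⊢
      omega

lemma high_split (Q : List Int) (k : Nat) (hQ : ∀ x ∈ Q, 1 < x) :
    pvHigh (Q ++ List.replicate k 1) = pairRec Q + k := by
  induction Q using pairRec.induct with
  | case1 => simp [pairRec, high_ones]
  | case2 a =>
    have ha := hQ a (by simp)
    cases k with
    | zero => simp [pvHigh, pairRec, show a ≠ 1 by omega]
    | succ m =>
      simp only [List.singleton_append, List.replicate_succ, pvHigh,
        if_neg (show ¬ a = 1 by omega), if_neg (by omega : ¬ (1:Int) < 1)]
      rw [show (1:Int) :: List.replicate m 1 = List.replicate (m + 1) 1 from rfl, high_ones]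
      simp [pairRec]
  | case3 a b Q' ih =>
    have ha := hQ a (by simp)
    have hb := hQ b (by simp)
    have hih := ih (fun x hx => hQ x (by simp [hx]))
    simp only [List.cons_append, pvHigh, if_neg (show ¬ a = 1 by omega), if_pos hb, hih, pairRec]
    ring

lemma low_pos (R : List Int) (hR : ∀ x ∈ R, 0 < x) :
    pvLow R = pvHigh R.reverse := by
  match R with
  | [] => rfl
  | [x] =>
    have := hR x (by simp)
    simp [pvLow, show ¬ x ≤ 0 by omega]
  | x :: y :: r =>
    have hx := hR x (by simp)
    have hy := hR y (by simp)
    simp [pvLow, show ¬ x ≤ 0 by omega, show ¬ y ≤ 0 by omega]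

lemma low_split (N R : List Int) (hN : ∀ x ∈ N, x ≤ 0) (hR : ∀ x ∈ R, 0 < x) :
    pvLow (N ++ R) = pairRec N + pvHigh R.reverse := by
  induction N using pairRec.induct with
  | case1 => simp [pairRec, low_pos R hR]
  | case2 a =>
    have ha := hN a (by simp)
    cases R with
    | nil => simp [pvLow, pairRec, ha, pvHigh]
    | cons y r =>
      have hy := hR y (by simp)
      simp only [List.singleton_append, pvLow, if_neg (by omega : ¬ y ≤ 0), if_pos ha]
      rw [low_pos (y :: r) hR]
      simp [pairRec]
  | case3 a b N' ih =>
    have hb := hN b (by simp)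
    have hih := ih (fun x hx => hN x (by simp [hx]))
    simp only [List.cons_append, pvLow, if_pos hb, hih, pairRec]
    ring

-- the three classes, each in order, permute back to the input
lemma classes_perm (xs : List Int) :
    (xs.filter (fun x => decide (x ≤ 0)) ++ List.replicate (xs.count 1) 1
      ++ xs.filter (fun x => decide (1 < x))).Perm xs := by
  induction xs with
  | nil => simp
  | cons x t ih =>
    by_cases h0 : x ≤ 0
    · have e1 : List.filter (fun z => decide (z ≤ 0)) (x :: t)
          = x :: t.filter (fun z => decide (z ≤ 0)) := by simp [List.filter_cons, h0]
      have e2 : List.count (1:Int) (x :: t) = t.count 1 := by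
        simp [List.count_cons, show x ≠ 1 by omega]
      have e3 : List.filter (fun z => decide (1 < z)) (x :: t)
          = t.filter (fun z => decide (1 < z)) := by
        simp [List.filter_cons, show ¬ 1 < x by omega]
      rw [e1, e2, e3]
      exact ih.cons x
    · by_cases h2 : x = 1
      · subst h2
        have e1 : List.filter (fun z => decide (z ≤ 0)) ((1:Int) :: t)
            = t.filter (fun z => decide (z ≤ 0)) := by simp
        have e2 : List.count (1:Int) ((1:Int) :: t) = t.count 1 + 1 := by simp
        have e3 : List.filter (fun z => decide (1 < z)) ((1:Int) :: t)
            = t.filter (fun z => decide (1 < z)) := by simp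
        rw [e1, e2, e3,
          show List.replicate (t.count 1 + 1) (1:Int) = 1 :: List.replicate (t.count 1) 1 from rfl,
          List.append_assoc,
          show ((1:Int) :: List.replicate (t.count 1) 1)
              ++ t.filter (fun z => decide (1 < z))
            = 1 :: (List.replicate (t.count 1) 1 ++ t.filter (fun z => decide (1 < z))) from rfl]
        refine List.perm_middle.trans (List.Perm.cons 1 ?_)
        rw [← List.append_assoc]
        exact ih
      · have h1 : 1 < x := by omega
        have e1 : List.filter (fun z => decide (z ≤ 0)) (x :: t)
            = t.filter (fun z => decide (z ≤ 0)) := by simp [List.filter_cons, h0]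
        have e2 : List.count (1:Int) (x :: t) = t.count 1 := by
          simp [List.count_cons, h2]
        have e3 : List.filter (fun z => decide (1 < z)) (x :: t)
            = x :: t.filter (fun z => decide (1 < z)) := by simp [List.filter_cons, h1]
        rw [e1, e2, e3]
        exact List.perm_middle.trans (ih.cons x)

-- the full ascending sort decomposes into the three sorted classes
lemma sorted_decomp (numbers : List Int) :
    PySem.List.sorted numbers (fun x => x) false
      = PySem.List.sorted (numbers.filter (fun x => decide (x ≤ 0))) (fun x => x) false
        ++ List.replicate (numbers.count 1) 1
        ++ (PySem.List.sorted (numbers.filter (fun x => decide (1 < x))) (fun x => x) true).reverse := by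
  apply PySem.List.sorted_id_eq_of_perm_of_pairwise
  · have hneg : (PySem.List.sorted (numbers.filter (fun x => decide (x ≤ 0))) (fun x => x) false).Perm
        (numbers.filter (fun x => decide (x ≤ 0))) := PySem.List.sorted_perm _ _ _
    have hpos : ((PySem.List.sorted (numbers.filter (fun x => decide (1 < x))) (fun x => x) true).reverse).Perm
        (numbers.filter (fun x => decide (1 < x))) :=
      (List.reverse_perm _).trans (PySem.List.sorted_perm _ _ _)
    exact ((hneg.append (List.Perm.refl _)).append hpos).trans (classes_perm numbers)
  · have hmemN : ∀ x ∈ PySem.List.sorted (numbers.filter (fun x => decide (x ≤ 0))) (fun x => x) false, x ≤ 0 := by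
      intro x hx
      have hm := (PySem.List.mem_sorted _ _ _ _).1 hx
      simpa using List.of_mem_filter hm
    have hmemP : ∀ x ∈ (PySem.List.sorted (numbers.filter (fun x => decide (1 < x))) (fun x => x) true).reverse, 1 < x := by
      intro x hx
      rw [List.mem_reverse] at hx
      have hm := (PySem.List.mem_sorted _ _ _ _).1 hx
      simpa using List.of_mem_filter hm
    rw [List.append_assoc, List.pairwise_append]
    refine ⟨PySem.List.sorted_pairwise _ _, ?_, ?_⟩
    · rw [List.pairwise_append]
      refine ⟨List.pairwise_replicate.2 (by simp), ?_, ?_⟩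
      · exact List.pairwise_reverse.2 (PySem.List.sorted_pairwise_rev _ _)
      · intro a ha b hb
        have h1 := List.eq_of_mem_replicate ha
        have h2 := hmemP b hb
        omega
    · intro a ha b hb
      have ha0 := hmemN a ha
      rcases List.mem_append.1 hb with hb | hb
      · have := List.eq_of_mem_replicate hb; omega
      · have := hmemP b hb; omega

-- ===== VERDICT (by name: the statement is the Claim_ definition above) =====
theorem max_sum_with_pairs_spec : Claim_equal_max_sum_with_pairs := by
  intro n numbers _
  unfold Spec_max_sum_with_pairs max_sum_with_pairs max_sum_with_pairs_alt
  simp only [part_fold, List.nil_append, zero_add]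
  rw [sorted_decomp numbers]
  set posDesc := PySem.List.sorted (numbers.filter (fun x => decide (1 < x))) (fun x => x) true with hposDesc
  set negAsc := PySem.List.sorted (numbers.filter (fun x => decide (x ≤ 0))) (fun x => x) false with hnegAsc
  have hmemN : ∀ x ∈ negAsc, x ≤ 0 := by
    intro x hx
    have hm := (PySem.List.mem_sorted _ _ _ _).1 hx
    simpa using List.of_mem_filter hm
  have hmemPD : ∀ x ∈ posDesc, 1 < x := by
    intro x hx
    have hm := (PySem.List.mem_sorted _ _ _ _).1 hx
    simpa using List.of_mem_filter hm
  have hmemR : ∀ x ∈ List.replicate (numbers.count 1) (1:Int) ++ posDesc.reverse, 0 < x := by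
    intro x hx
    rcases List.mem_append.1 hx with hx | hx
    · have := List.eq_of_mem_replicate hx; omega
    · rw [List.mem_reverse] at hx
      have := hmemPD x hx
      omega
  rw [List.append_assoc, low_split negAsc _ hmemN hmemR,
    List.reverse_append, List.reverse_reverse, List.reverse_replicate,
    high_split posDesc (numbers.count 1) hmemPD]
  rw [rangeSum posDesc 0, rangeSum negAsc]
  have hA : (if posDesc.length % 2 = 1
        then 0 + pairRecEven posDesc + PySem.List.pyGetD posDesc (-1) 0
        else 0 + pairRecEven posDesc) = pairRec posDesc := by
    rw [← pairRec_split posDesc]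
    split_ifs <;> ring
  rw [hA]
  have hB : (if negAsc.length % 2 = 1
        then pairRec posDesc + pairRecEven negAsc + PySem.List.pyGetD negAsc (-1) 0
        else pairRec posDesc + pairRecEven negAsc)
      = pairRec posDesc + pairRec negAsc := by
    rw [← pairRec_split negAsc]
    split_ifs <;> ring
  rw [hB]
  ring
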